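-- pv_equiv track=rewrite | github.com/collinsakenga/codewars_solutions | 6 kyu/Is Divisible By 6 Mk II.py | is_divisible_by_6
-- ===== SOURCE A (Python) =====
-- from itertools import product
--
-- def is_divisible_by_6(string):
--     if string[-1]!="*" and int(string[-1])%2:
--         return []
--     temp=list(string)
--     index=[i for i,j in enumerate(temp) if j=="*"]
--     res=[]
--     for sequence in product("0123456789", repeat=len(index)):
--         replace="".join(sequence)
--         number=temp.copy()
--         for i,j in enumerate(index):
--             number[j]=replace[i]
--         if int(number[-1])%2==0 and digit_sum("".join(number))%3==0:
--             res.append("".join(number))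
--     return res
--
-- def digit_sum(s):
--     return sum(int(i) for i in s)
-- ===== SOURCE B (Python) =====
-- def is_divisible_by_6(string):
--     if string[-1] != "*" and int(string[-1]) % 2:
--         return []
--     chars = list(string)
--     stars = [i for i in range(len(chars)) if chars[i] == "*"]
--     res = []
--
--     def fill(k, total):
--         if k == len(stars):
--             if int(chars[-1]) % 2 == 0 and total % 3 == 0:
--                 res.append("".join(chars))
--             return
--         p = stars[k]
--         for d in "0123456789":
--             chars[p] = d
--             fill(k + 1, total + int(d))
--         chars[p] = "*"
--
--     fill(0, sum(int(c) for c in chars if c != "*"))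
--     return res
-- ===== Notes on version B (the rewrite author's own statement) =====
-- stated objective: alternative
-- what changed: itertools.product over all digit tuples with a per-tuple list copy, index-assignment loop and full digit_sum recomputation is replaced by a recursion over the star positions that fills one shared template in place and carries the running digit sum, doing O(1) work per candidate instead of O(n).
import Mathlib
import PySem

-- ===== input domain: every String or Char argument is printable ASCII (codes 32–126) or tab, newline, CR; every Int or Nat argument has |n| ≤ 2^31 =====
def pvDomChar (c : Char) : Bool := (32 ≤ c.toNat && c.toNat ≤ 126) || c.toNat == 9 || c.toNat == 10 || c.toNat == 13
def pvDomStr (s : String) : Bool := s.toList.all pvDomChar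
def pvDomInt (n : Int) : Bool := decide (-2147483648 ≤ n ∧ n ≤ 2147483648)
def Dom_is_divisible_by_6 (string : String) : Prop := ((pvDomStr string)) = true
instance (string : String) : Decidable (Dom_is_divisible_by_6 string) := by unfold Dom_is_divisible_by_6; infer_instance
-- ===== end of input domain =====

-- B replaces the itertools.product enumeration (per-tuple list copy + full digit_sum) by a
-- recursion over the star positions that fills a template and carries the running digit sum.
-- Return-value equivalence on Pre_ (Python A raises outside it).

-- ===== PORT A =====

-- int(c) for a one-character string; Python raises ValueError where ofStr? = none, those
-- inputs are excluded by Pre_, the port uses 0 there.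
def pvVal (c : Char) : Int := (PySem.Int.ofStr? (String.ofList [c])).getD 0

-- digit_sum(s) = sum(int(i) for i in s)
def pvDigitSum (cs : List Char) : Int := (cs.map pvVal).sum

def pvDigits : List Char := "0123456789".toList

-- itertools.product("0123456789", repeat=n), each tuple as a list of chars
def pvProd : Nat → List (List Char)
  | 0 => [[]]
  | n + 1 => pvDigits.flatMap (fun d => (pvProd n).map (fun t => d :: t))

-- for i,j in enumerate(index): number[j] = replace[i]   (j ≥ 0 always)
def pvAssign (number : List Char) (index : List Int) (repl : List Char) : List Char :=
  (index.zip repl).foldl (fun n jc => n.set jc.1.toNat jc.2) number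

-- int(number[-1])%2==0 and digit_sum("".join(number))%3==0
def pvCheckA (number : List Char) : Bool :=
  match number.getLast? with
  | some c => PySem.Int.mod (pvVal c) 2 == 0 && PySem.Int.mod (pvDigitSum number) 3 == 0
  | none => false

def is_divisible_by_6 (string : String) : List String :=
  let temp := string.toList
  match temp.getLast? with
  | none => []  -- Python: string[-1] raises IndexError on "", excluded by Pre_
  | some last =>
    if last != '*' && PySem.Int.mod (pvVal last) 2 != 0 then []
    else
      let index := (PySem.List.enumerate temp 0).filterMap
        (fun ij => if ij.2 = '*' then some ij.1 else none)
      (pvProd index.length).foldl (fun res seq =>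
        let number := pvAssign temp index seq
        if pvCheckA number then res ++ [String.ofList number] else res) []

-- ===== PORT B =====

-- recursive fill over the remaining star positions, carrying the running digit sum
def pvFill (chars : List Char) (stars : List Int) (total : Int) : List String :=
  match stars with
  | [] =>
    match chars.getLast? with
    | some c =>
      if PySem.Int.mod (pvVal c) 2 == 0 && PySem.Int.mod total 3 == 0
      then [String.ofList chars] else []
    | none => []  -- unreachable from is_divisible_by_6_alt (chars nonempty there)
  | p :: rest => pvDigits.flatMap (fun d => pvFill (chars.set p.toNat d) rest (total + pvVal d))

def is_divisible_by_6_alt (string : String) : List String :=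
  let chars := string.toList
  match chars.getLast? with
  | none => []  -- Python: string[-1] raises IndexError on "", excluded by Pre_
  | some last =>
    if last != '*' && PySem.Int.mod (pvVal last) 2 != 0 then []
    else
      let stars := (PySem.List.pyRange 0 (chars.length : Int) 1).filter
        (fun i => PySem.List.pyGetD chars i ' ' == '*')
      pvFill chars stars (((chars.filter (fun c => c != '*')).map pvVal).sum)

-- ===== PRECONDITION & SPEC =====

-- Pre_ excludes exactly the inputs where Python A raises: the empty string (IndexError),
-- and strings containing a character other than a digit or '*' unless the last character is
-- a fixed odd digit (there A returns [] before parsing anything, so those stay inside Pre_);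
-- otherwise int()/digit_sum hits a non-digit character and raises ValueError.
def Pre_is_divisible_by_6 (string : String) : Prop :=
  string.toList ≠ [] ∧
  ((string.toList.all (fun c => c.isDigit || c == '*')) = true ∨
   ((string.toList.getLastD ' ').isDigit ∧ (string.toList.getLastD ' ').toNat % 2 = 1))

instance (string : String) : Decidable (Pre_is_divisible_by_6 string) := by
  unfold Pre_is_divisible_by_6; infer_instance

def pvWitness_is_divisible_by_6 : String := "1*"

def Spec_is_divisible_by_6 (string : String) (out : List String) : Prop := out = is_divisible_by_6_alt string
instance (string : String) (out : List String) : Decidable (Spec_is_divisible_by_6 string out) := by unfold Spec_is_divisible_by_6; infer_instance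

-- ===== CLAIM (what is proved, stated in full; the proofs are below) =====
def Claim_equal_is_divisible_by_6 : Prop := ∀ (string : String), Dom_is_divisible_by_6 string → Pre_is_divisible_by_6 string → Spec_is_divisible_by_6 string (is_divisible_by_6 string)

-- ===== LEMMAS AND PROOFS =====

-- the sum B starts from (the expression in is_divisible_by_6_alt), as a function
def pvBaseSum (cs : List Char) : Int := ((cs.filter (fun c => c != '*')).map pvVal).sum

theorem pvVal_star : pvVal '*' = 0 := by decide

theorem pvDigits_ne_star : ∀ d ∈ pvDigits, d ≠ '*' := by
  intro d hd
  simp [pvDigits] at hd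
  rcases hd with h|h|h|h|h|h|h|h|h|h <;> subst h <;> decide

theorem pvBaseSum_cons (c : Char) (t : List Char) :
    pvBaseSum (c :: t) = (if c = '*' then 0 else pvVal c) + pvBaseSum t := by
  by_cases h : c = '*' <;> simp [pvBaseSum, h]

-- '*' contributes 0 to digit_sum's port, so A's digit sum equals B's non-star sum
theorem pvDigitSum_eq_baseSum (cs : List Char) : pvDigitSum cs = pvBaseSum cs := by
  induction cs with
  | nil => rfl
  | cons c t ih =>
    rw [pvBaseSum_cons]
    by_cases h : c = '*'
    · subst h; simp [pvDigitSum, pvVal_star] at ih ⊢; simpa using ih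
    · simp only [pvDigitSum, List.map_cons, List.sum_cons, if_neg h] at ih ⊢
      rw [ih]

theorem pvAssign_cons (chars : List Char) (p : Int) (rest : List Int) (d : Char)
    (seq : List Char) :
    pvAssign chars (p :: rest) (d :: seq) = pvAssign (chars.set p.toNat d) rest seq := by
  simp [pvAssign]

-- replacing a '*' by a digit adds that digit's value to the non-star sum
theorem pvBaseSum_set (cs : List Char) (n : Nat) (d : Char)
    (hc : cs[n]? = some '*') (hd : d ≠ '*') :
    pvBaseSum (cs.set n d) = pvBaseSum cs + pvVal d := by
  induction cs generalizing n with
  | nil => simp at hc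
  | cons c t ih =>
    cases n with
    | zero =>
      simp at hc
      subst hc
      rw [List.set_cons_zero, pvBaseSum_cons, pvBaseSum_cons]
      simp [hd]
      ring
    | succ m =>
      simp at hc
      rw [List.set_cons_succ, pvBaseSum_cons, pvBaseSum_cons, ih m hc]
      ring

-- A's 'if cond: res.append(x)' foldl as a flatMap
theorem foldl_if_eq_flatMap {α β : Type} (l : List α) (p : α → Bool) (f : α → β)
    (acc : List β) :
    l.foldl (fun r x => if p x then r ++ [f x] else r) acc
      = acc ++ l.flatMap (fun x => if p x then [f x] else []) := by
  induction l generalizing acc with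
  | nil => simp
  | cons x t ih =>
    by_cases h : p x <;> simp [List.foldl_cons, h, ih]

-- the comprehension over enumerate (A) computes the same star positions as the
-- range-filter comprehension (B)
theorem pvStarpos (s : List Char) :
    (PySem.List.enumerate s 0).filterMap (fun ij => if ij.2 = '*' then some ij.1 else none)
      = (PySem.List.pyRange 0 (s.length : Int) 1).filter
          (fun i => PySem.List.pyGetD s i ' ' == '*') := by
  rw [PySem.List.enumerate_eq_map_pyRange s ' ', List.filterMap_map, PySem.List.len_eq]
  simp only [Function.comp_def]
  have h : ∀ (l : List Int),
      l.filterMap (fun j => if PySem.List.pyGetD s j ' ' = '*' then some j else none)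
        = l.filter (fun i => PySem.List.pyGetD s i ' ' == '*') := by
    intro l
    induction l with
    | nil => rfl
    | cons x t ih =>
      by_cases h : PySem.List.pyGetD s x ' ' = '*' <;> simp [h, ih]
  exact h _

-- main invariant: the recursive fill over star positions enumerates exactly what A's
-- product loop enumerates, provided the positions are increasing, point at '*', and the
-- carried total is the non-star digit sum of the template
theorem pvFill_eq (idx : List Int) (chars : List Char) (total : Int)
    (hp : idx.Pairwise (· < ·))
    (hstar : ∀ j ∈ idx, 0 ≤ j ∧ chars[j.toNat]? = some '*')
    (ht : total = pvBaseSum chars) :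
    pvFill chars idx total
      = (pvProd idx.length).flatMap (fun seq =>
          if pvCheckA (pvAssign chars idx seq) then [String.ofList (pvAssign chars idx seq)]
          else []) := by
  induction idx generalizing chars total with
  | nil =>
    simp only [pvProd, List.length_nil, List.flatMap_cons, List.flatMap_nil, List.append_nil]
    have hassign : pvAssign chars [] [] = chars := by simp [pvAssign]
    rw [hassign]
    cases hlast : chars.getLast? with
    | none => simp [pvFill, pvCheckA, hlast]
    | some c =>
      simp only [pvFill, pvCheckA, hlast, ht, pvDigitSum_eq_baseSum]
  | cons p rest ih =>
    have h0 : 0 ≤ p := (hstar p (by simp)).1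
    have hps : chars[p.toNat]? = some '*' := (hstar p (by simp)).2
    rw [List.pairwise_cons] at hp
    simp only [pvFill, pvProd, List.length_cons, List.flatMap_assoc, List.flatMap_map]
    apply List.flatMap_congr
    intro d hd
    have hd9 : d ≠ '*' := pvDigits_ne_star d hd
    simp only [pvAssign_cons]
    apply ih _ _ hp.2
    · intro j hj
      have hlt : p < j := hp.1 j hj
      have hne : p.toNat ≠ j.toNat := by omega
      exact ⟨(hstar j (List.mem_cons_of_mem _ hj)).1,
        by rw [List.getElem?_set_ne hne]; exact (hstar j (List.mem_cons_of_mem _ hj)).2⟩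
    · rw [pvBaseSum_set chars p.toNat d hps hd9, ht]

-- ===== VERDICT (by name: the statement is the Claim_ definition above) =====
theorem is_divisible_by_6_spec : Claim_equal_is_divisible_by_6 := by
  unfold Claim_equal_is_divisible_by_6
  intro s _ _
  unfold Spec_is_divisible_by_6 is_divisible_by_6 is_divisible_by_6_alt
  cases hlast : s.toList.getLast? with
  | none => simp only [hlast]
  | some last =>
    simp only [hlast]
    split
    · rfl
    · rw [pvStarpos]
      rw [foldl_if_eq_flatMap, List.nil_append]
      rw [pvFill_eq _ _ _ ?hp ?hs ?ht]
      case ht => rfl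
      case hp =>
        exact (PySem.List.pairwise_lt_pyRange_one (a := 0) (b := (s.toList.length : Int))).sublist
          (List.filter_sublist)
      case hs =>
        intro j hj
        rw [List.mem_filter, PySem.List.mem_pyRange_one] at hj
        obtain ⟨⟨hj0, hjl⟩, hjs⟩ := hj
        refine ⟨hj0, ?_⟩
        have hn : j.toNat < s.toList.length := by omega
        rw [beq_iff_eq, PySem.List.pyGetD_eq_getElem s.toList ' ' hj0 hjl] at hjs
        rw [List.getElem?_eq_getElem hn, hjs]
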